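-- pv_equiv track=rewrite | github.com/The-AnonymousCoder/VGAT-B | zzContrastExperiment/Tan24/Fig1.py | construction_fast
-- ===== SOURCE A (Python) =====
-- from typing import Dict, List
--
-- def construction_fast(Xlist: List[List[float]], feature_num: int, Lst_WaterMark: List[int]):
--     """精确但向量化的快速构造函数，等价于原始 Construction 的成对投票。
--
--     将所有要素长度 Ni 做到模 W(=水印长度) 的直方图，并按奇偶拆分，
--     再对类别对进行组合计数，复杂度 O(W^2) 而非 O(n^2)。
--     """
--     W = len(Lst_WaterMark)
--
--     # 统计 Ni 的模值与奇偶
--     counts_even = [0] * W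
--     counts_odd = [0] * W
--     for coords in Xlist:
--         Ni = len(coords)
--         r = Ni % W
--         if (Ni % 2) == 0:
--             counts_even[r] += 1
--         else:
--             counts_odd[r] += 1
--
--     # 聚合非空类别 (r, parity, count)
--     categories: List[tuple] = []
--     for r in range(W):
--         c0 = counts_even[r]
--         c1 = counts_odd[r]
--         if c0:
--             categories.append((r, 0, c0))
--         if c1:
--             categories.append((r, 1, c1))
--
--     # 计算对所有无序对的贡献
--     acc = [0] * W
--     for i in range(len(categories)):
--         r1, p1, c1 = categories[i]
--         # 同一类别内部对
--         if c1 >= 2: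
--             k = (r1 * r1) % W
--             acc[k] += (c1 * (c1 - 1) // 2)  # 同奇偶 -> +1
--         # 跨类别对
--         for j in range(i + 1, len(categories)):
--             r2, p2, c2 = categories[j]
--             k = (r1 * r2) % W
--             sign = 1 if p1 == p2 else -1
--             acc[k] += sign * (c1 * c2)
--
--     # 阈值化到 0/255
--     List_Fea = [255 if v > 0 else 0 for v in acc]
--     return List_Fea
-- ===== SOURCE B (Python) =====
-- from typing import List
--
--
-- def construction_fast(Xlist: List[List[float]], feature_num: int, Lst_WaterMark: List[int]):
--     """Direct naive pairwise voting: for every unordered pair of features,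
--     vote +1 at key (N1*N2) % W if the two lengths share parity, else -1,
--     then threshold. No histogram, no category aggregation."""
--     W = len(Lst_WaterMark)
--     acc = [0] * W
--     lens = [len(coords) for coords in Xlist]
--     while lens:
--         x = lens.pop(0)
--         for y in lens:
--             k = (x * y) % W
--             if (x - y) % 2 == 0:
--                 acc[k] += 1
--             else:
--                 acc[k] -= 1
--     return [255 if v > 0 else 0 for v in acc]
-- ===== Notes on version B (the rewrite author's own statement) =====
-- stated objective: simpler
-- what changed: Replaced the residue/parity histogram with category-pair combination counting by a direct scan over all unordered pairs of feature lengths, each pair voting +/-1 at key (N1*N2) % W before thresholding.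
import Mathlib
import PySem

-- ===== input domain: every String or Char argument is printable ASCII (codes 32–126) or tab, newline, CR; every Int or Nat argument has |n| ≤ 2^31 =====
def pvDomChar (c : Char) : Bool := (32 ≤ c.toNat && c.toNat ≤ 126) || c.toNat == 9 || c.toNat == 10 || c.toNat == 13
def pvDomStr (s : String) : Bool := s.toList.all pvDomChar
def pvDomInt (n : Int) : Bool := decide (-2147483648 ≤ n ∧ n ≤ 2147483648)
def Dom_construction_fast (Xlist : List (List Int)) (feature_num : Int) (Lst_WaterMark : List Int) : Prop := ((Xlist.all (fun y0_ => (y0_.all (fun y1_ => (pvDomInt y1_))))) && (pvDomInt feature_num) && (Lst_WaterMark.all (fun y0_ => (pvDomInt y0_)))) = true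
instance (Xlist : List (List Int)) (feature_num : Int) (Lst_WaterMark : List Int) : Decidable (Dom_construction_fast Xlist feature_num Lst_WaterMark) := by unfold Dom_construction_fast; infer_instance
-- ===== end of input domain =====

-- B replaces A's residue/parity histogram + category-pair combination counting by a direct
-- scan over all unordered pairs of feature lengths (one +/-1 vote per pair); objective: simpler.

-- ===== PORT A =====
-- every list index A uses (counts_even[r], counts_odd[r], acc[k]) is (key % W).toNat with
-- 0 ≤ key % W < W when W > 0 (the Pre_ domain), so `List.set`/`pyGetD` are exact there
def cfCountStep (W : Int) (st : List Int × List Int) (coords : List Int) : List Int × List Int :=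
  let Ni : Int := PySem.List.len coords
  let r := PySem.Int.mod Ni W
  if PySem.Int.mod Ni 2 = 0 then
    (st.1.set r.toNat (PySem.List.pyGetD st.1 r 0 + 1), st.2)
  else
    (st.1, st.2.set r.toNat (PySem.List.pyGetD st.2 r 0 + 1))

def cfCatStep (ce co : List Int) (cs : List (Int × Int × Int)) (r : Int) : List (Int × Int × Int) :=
  let c0 := PySem.List.pyGetD ce r 0
  let c1 := PySem.List.pyGetD co r 0
  let cs1 := if c0 ≠ 0 then cs ++ [(r, (0 : Int), c0)] else cs
  if c1 ≠ 0 then cs1 ++ [(r, (1 : Int), c1)] else cs1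

def cfPairStep (W : Int) (t1 : Int × Int × Int) (acc : List Int) (t2 : Int × Int × Int) : List Int :=
  let k := PySem.Int.mod (t1.1 * t2.1) W
  acc.set k.toNat (PySem.List.pyGetD acc k 0 + (if t1.2.1 = t2.2.1 then 1 else -1) * (t1.2.2 * t2.2.2))

def cfOuterStep (W : Int) (cats : List (Int × Int × Int)) (n : Int) (acc : List Int) (i : Int) : List Int :=
  let t1 := PySem.List.pyGetD cats i (0, 0, 0)
  let acc1 := if 2 ≤ t1.2.2 then
      acc.set (PySem.Int.mod (t1.1 * t1.1) W).toNat
        (PySem.List.pyGetD acc (PySem.Int.mod (t1.1 * t1.1) W) 0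
          + PySem.Int.floordiv (t1.2.2 * (t1.2.2 - 1)) 2)
    else acc
  (PySem.List.pyRange (i + 1) n 1).foldl
    (fun acc j => cfPairStep W t1 acc (PySem.List.pyGetD cats j (0, 0, 0))) acc1

def construction_fast (Xlist : List (List Int)) (feature_num : Int) (Lst_WaterMark : List Int) : List Int :=
  let W : Int := PySem.List.len Lst_WaterMark
  let counts := Xlist.foldl (cfCountStep W) (List.replicate W.toNat 0, List.replicate W.toNat 0)
  let cats : List (Int × Int × Int) := (PySem.List.pyRange 0 W 1).foldl (cfCatStep counts.1 counts.2) []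
  let acc := (PySem.List.pyRange 0 (PySem.List.len cats) 1).foldl
    (cfOuterStep W cats (PySem.List.len cats)) (List.replicate W.toNat 0)
  acc.map (fun v => if 0 < v then 255 else 0)

-- ===== PORT B =====
def cfAltStep (W x : Int) (a : List Int) (y : Int) : List Int :=
  let k := PySem.Int.mod (x * y) W
  if PySem.Int.mod (x - y) 2 = 0 then
    a.set k.toNat (PySem.List.pyGetD a k 0 + 1)
  else
    a.set k.toNat (PySem.List.pyGetD a k 0 - 1)

def cfAltInner (W x : Int) (acc : List Int) (ys : List Int) : List Int :=
  ys.foldl (cfAltStep W x) acc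

def cfAltLoop (W : Int) (acc : List Int) : List Int → List Int
  | [] => acc
  | x :: xs => cfAltLoop W (cfAltInner W x acc xs) xs

def construction_fast_alt (Xlist : List (List Int)) (feature_num : Int) (Lst_WaterMark : List Int) : List Int :=
  let W : Int := PySem.List.len Lst_WaterMark
  let lens := Xlist.map (fun coords => PySem.List.len coords)
  (cfAltLoop W (List.replicate W.toNat 0) lens).map (fun v => if 0 < v then 255 else 0)

-- ===== PRECONDITION & SPEC =====
-- Pre_ excludes only the inputs where A raises ZeroDivisionError: an empty watermark
-- together with a nonempty Xlist (Ni % 0).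
def Pre_construction_fast (Xlist : List (List Int)) (feature_num : Int) (Lst_WaterMark : List Int) : Prop :=
  Lst_WaterMark ≠ [] ∨ Xlist = []
instance (Xlist : List (List Int)) (feature_num : Int) (Lst_WaterMark : List Int) : Decidable (Pre_construction_fast Xlist feature_num Lst_WaterMark) := by unfold Pre_construction_fast; infer_instance

def pvWitness_construction_fast : List (List Int) × Int × List Int := ([[1], [2, 3]], 0, [1, 0, 1])

def Spec_construction_fast (Xlist : List (List Int)) (feature_num : Int) (Lst_WaterMark : List Int) (out : List Int) : Prop := out = construction_fast_alt Xlist feature_num Lst_WaterMark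
instance (Xlist : List (List Int)) (feature_num : Int) (Lst_WaterMark : List Int) (out : List Int) : Decidable (Spec_construction_fast Xlist feature_num Lst_WaterMark out) := by unfold Spec_construction_fast; infer_instance

-- ===== CLAIM (what is proved, stated in full; the proofs are below) =====
def Claim_equal_construction_fast : Prop := ∀ (Xlist : List (List Int)) (feature_num : Int) (Lst_WaterMark : List Int), Dom_construction_fast Xlist feature_num Lst_WaterMark → Pre_construction_fast Xlist feature_num Lst_WaterMark → Spec_construction_fast Xlist feature_num Lst_WaterMark (construction_fast Xlist feature_num Lst_WaterMark)


-- ===== LEMMAS AND PROOFS =====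

-- the per-pair vote of a pair of classes (residue, parity), localized at output slot s
def qAt (W s : Int) (q1 q2 : Int × Int) : Int :=
  if (q1.1 * q2.1) % W = s then (if q1.2 = q2.2 then 1 else -1) else 0

-- total vote at slot s of all unordered pairs of a class list
def pairQ (W s : Int) : List (Int × Int) → Int
  | [] => 0
  | q :: qs => (qs.map (qAt W s q)).sum + pairQ W s qs

-- total vote at slot s between two class lists
def crossQ (W s : Int) (xs ys : List (Int × Int)) : Int :=
  (xs.map (fun x => (ys.map (qAt W s x)).sum)).sum

-- the class of a feature length
def clsOf (W x : Int) : Int × Int := (x % W, x % 2)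

-- A's per-category contribution at slot s, following A's double loop
def catS (W s : Int) : List (Int × Int × Int) → Int
  | [] => 0
  | t :: rest =>
    (if 2 ≤ t.2.2 ∧ (t.1 * t.1) % W = s then t.2.2 * (t.2.2 - 1) / 2 else 0)
    + ((rest.map (fun u => if (t.1 * u.1) % W = s then (if t.2.1 = u.2.1 then 1 else -1) * (t.2.2 * u.2.2) else 0)).sum)
    + catS W s rest

def blockOf (t : Int × Int × Int) : List (Int × Int) := List.replicate t.2.2.toNat (t.1, t.2.1)

lemma getD_set_bump (acc : List Int) (k : Int) (s : Nat) (v : Int)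
    (h0 : 0 ≤ k) (h1 : k < (acc.length : Int)) :
    (acc.set k.toNat (PySem.List.pyGetD acc k 0 + v)).getD s 0
      = acc.getD s 0 + (if k = (s : Int) then v else 0) := by
  have hk : k.toNat < acc.length := by omega
  have hkk : ((k.toNat : Nat) : Int) = k := by omega
  have hpy : PySem.List.pyGetD acc k 0 = acc[k.toNat] := by
    conv_lhs => rw [← hkk]
    rw [PySem.List.pyGetD_natCast, List.getD_eq_getElem _ _ hk]
  rw [hpy]
  by_cases hs : k.toNat = s
  · have hsl : s < acc.length := hs ▸ hk
    rw [List.getD_eq_getElem _ _ (by simpa using hsl), List.getD_eq_getElem _ _ hsl,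
        if_pos (by omega)]
    subst hs
    rw [List.getElem_set_self]
  · rw [if_neg (by omega)]
    by_cases hsl : s < acc.length
    · rw [List.getD_eq_getElem _ _ (by simpa using hsl), List.getD_eq_getElem _ _ hsl,
          List.getElem_set_ne (by omega)]
      omega
    · rw [List.getD_eq_default _ _ (by simpa using hsl), List.getD_eq_default _ _ (by omega)]
      ring

lemma foldl_len_pres {α : Type} (f : List Int → α → List Int)
    (hf : ∀ acc a, (f acc a).length = acc.length) :
    ∀ (l : List α) (acc : List Int), (l.foldl f acc).length = acc.length := by
  intro l
  induction l with
  | nil => intro acc; rfl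
  | cons a l ih => intro acc; rw [List.foldl_cons, ih, hf]

lemma getD_replicate_zero (n s : Nat) : (List.replicate n (0 : Int)).getD s 0 = 0 := by
  rcases Nat.lt_or_ge s n with h | h
  · rw [List.getD_eq_getElem _ _ (by simpa using h)]
    simp
  · rw [List.getD_eq_default _ _ (by simpa using h)]

-- ===== B side =====

lemma cfAltStep_length (W x : Int) (acc : List Int) (y : Int) :
    (cfAltStep W x acc y).length = acc.length := by
  simp only [cfAltStep]
  split <;> simp

lemma cfAltInner_length (W x : Int) (ys acc : List Int) :
    (cfAltInner W x acc ys).length = acc.length :=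
  foldl_len_pres _ (cfAltStep_length W x) ys acc

lemma cfAltLoop_length (W : Int) : ∀ (ls acc : List Int), (cfAltLoop W acc ls).length = acc.length := by
  intro ls
  induction ls with
  | nil => intro acc; rfl
  | cons x xs ih =>
    intro acc
    rw [show cfAltLoop W acc (x :: xs) = cfAltLoop W (cfAltInner W x acc xs) xs from rfl,
        ih, cfAltInner_length]

lemma mod2_iff (x y : Int) : PySem.Int.mod (x - y) 2 = 0 ↔ x % 2 = y % 2 := by
  rw [PySem.Int.mod_eq_emod_of_pos (by norm_num)]
  omega

lemma cfAltStep_getD (W : Int) (hW : 0 < W) (x y : Int) (s : Nat) (acc : List Int)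
    (hlen : acc.length = W.toNat) :
    (cfAltStep W x acc y).getD s 0 = acc.getD s 0 + qAt W (s : Int) (clsOf W x) (clsOf W y) := by
  have hkey : PySem.Int.mod (x * y) W = ((x % W) * (y % W)) % W := by
    rw [PySem.Int.mod_eq_emod_of_pos hW, Int.mul_emod]
  have hb0 : 0 ≤ PySem.Int.mod (x * y) W := by
    rw [hkey]; exact Int.emod_nonneg _ (by omega)
  have hb1 : PySem.Int.mod (x * y) W < (acc.length : Int) := by
    rw [hkey]
    have := Int.emod_lt_of_pos ((x % W) * (y % W)) hW
    omega
  simp only [cfAltStep]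
  by_cases hp : PySem.Int.mod (x - y) 2 = 0
  · rw [if_pos hp, getD_set_bump _ _ _ _ hb0 hb1]
    have hxy : x % 2 = y % 2 := (mod2_iff x y).1 hp
    rw [hkey]
    simp [qAt, clsOf, hxy]
  · rw [if_neg hp]
    have h1 : PySem.List.pyGetD acc (PySem.Int.mod (x * y) W) 0 - 1
        = PySem.List.pyGetD acc (PySem.Int.mod (x * y) W) 0 + (-1) := by ring
    rw [h1, getD_set_bump _ _ _ _ hb0 hb1]
    have hxy : ¬ (x % 2 = y % 2) := fun h => hp ((mod2_iff x y).2 h)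
    rw [hkey]
    simp [qAt, clsOf, hxy]

lemma cfAltInner_getD (W : Int) (hW : 0 < W) (x : Int) (s : Nat) :
    ∀ (ys acc : List Int), acc.length = W.toNat →
    (cfAltInner W x acc ys).getD s 0
      = acc.getD s 0 + ((ys.map (fun y => qAt W (s : Int) (clsOf W x) (clsOf W y))).sum) := by
  intro ys
  induction ys with
  | nil => intro acc h; simp [cfAltInner]
  | cons y ys ih =>
    intro acc hlen
    rw [show cfAltInner W x acc (y :: ys) = cfAltInner W x (cfAltStep W x acc y) ys from rfl]
    rw [ih _ (by rw [cfAltStep_length]; exact hlen), cfAltStep_getD W hW x y s acc hlen]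
    simp only [List.map_cons, List.sum_cons]
    ring

lemma cfAltLoop_getD (W : Int) (hW : 0 < W) (s : Nat) :
    ∀ (ls acc : List Int), acc.length = W.toNat →
    (cfAltLoop W acc ls).getD s 0 = acc.getD s 0 + pairQ W (s : Int) (ls.map (clsOf W)) := by
  intro ls
  induction ls with
  | nil => intro acc h; simp [cfAltLoop, pairQ]
  | cons x xs ih =>
    intro acc hlen
    rw [show cfAltLoop W acc (x :: xs) = cfAltLoop W (cfAltInner W x acc xs) xs from rfl]
    rw [ih _ (by rw [cfAltInner_length]; exact hlen), cfAltInner_getD W hW x s xs acc hlen]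
    simp only [List.map_cons, pairQ, List.map_map, Function.comp_def]
    omega

-- ===== A side: counts =====

lemma counts_fold (W : Int) (hW : 0 < W) (s : Nat) :
    ∀ (Xs : List (List Int)) (ce co : List Int), ce.length = W.toNat → co.length = W.toNat →
    ((Xs.foldl (cfCountStep W) (ce, co)).1.getD s 0
        = ce.getD s 0 + ((List.count ((s : Int), (0:Int)) (Xs.map (fun c => clsOf W ((c.length : Int)))) : Int)))
    ∧ ((Xs.foldl (cfCountStep W) (ce, co)).2.getD s 0
        = co.getD s 0 + ((List.count ((s : Int), (1:Int)) (Xs.map (fun c => clsOf W ((c.length : Int)))) : Int)))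
    ∧ (Xs.foldl (cfCountStep W) (ce, co)).1.length = W.toNat
    ∧ (Xs.foldl (cfCountStep W) (ce, co)).2.length = W.toNat := by
  intro Xs
  induction Xs with
  | nil => intro ce co h1 h2; simp [h1, h2]
  | cons c Xs ih =>
    intro ce co h1 h2
    rw [List.foldl_cons]
    have hrkey : PySem.Int.mod ((c.length : Int)) W = (c.length : Int) % W :=
      PySem.Int.mod_eq_emod_of_pos hW
    have hr0 : 0 ≤ (c.length : Int) % W := Int.emod_nonneg _ (by omega)
    have hr1 : (c.length : Int) % W < W := Int.emod_lt_of_pos _ hW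
    have h2mod : PySem.Int.mod ((c.length : Int)) 2 = (c.length : Int) % 2 :=
      PySem.Int.mod_eq_emod_of_pos (by norm_num)
    by_cases hev : (c.length : Int) % 2 = 0
    · have hstep : cfCountStep W (ce, co) c
          = (ce.set (((c.length : Int)) % W).toNat (PySem.List.pyGetD ce (((c.length : Int)) % W) 0 + 1), co) := by
        simp only [cfCountStep, PySem.List.len_eq, hrkey, h2mod, if_pos hev]
      rw [hstep]
      have hlen' : (ce.set (((c.length : Int)) % W).toNat (PySem.List.pyGetD ce (((c.length : Int)) % W) 0 + 1)).length = W.toNat := by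
        simp [h1]
      obtain ⟨ih1, ih2, ih3, ih4⟩ := ih _ _ hlen' h2
      have hbump := getD_set_bump ce ((c.length : Int) % W) s 1 hr0 (by rw [h1]; omega)
      refine ⟨?_, ?_, ih3, ih4⟩
      · rw [ih1, hbump, List.map_cons]
        by_cases hrs : (c.length : Int) % W = (s : Int)
        · have hcq : clsOf W ((c.length : Int)) = ((s : Int), (0:Int)) := by
            unfold clsOf; rw [hrs, hev]
          rw [if_pos hrs]
          simp [hcq]
          ring
        · have hcq : ¬ (clsOf W ((c.length : Int)) = ((s : Int), (0:Int))) := by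
            simp [clsOf, hrs]
          rw [if_neg hrs]
          simp [hcq]
      · rw [ih2, List.map_cons]
        have hcq : ¬ (clsOf W ((c.length : Int)) = ((s : Int), (1:Int))) := by
          simp [clsOf, hev]
        simp [hcq]
    · have hodd : (c.length : Int) % 2 = 1 := by omega
      have hstep : cfCountStep W (ce, co) c
          = (ce, co.set (((c.length : Int)) % W).toNat (PySem.List.pyGetD co (((c.length : Int)) % W) 0 + 1)) := by
        simp only [cfCountStep, PySem.List.len_eq, hrkey, h2mod, if_neg hev]
      rw [hstep]
      have hlen' : (co.set (((c.length : Int)) % W).toNat (PySem.List.pyGetD co (((c.length : Int)) % W) 0 + 1)).length = W.toNat := by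
        simp [h2]
      obtain ⟨ih1, ih2, ih3, ih4⟩ := ih _ _ h1 hlen'
      have hbump := getD_set_bump co ((c.length : Int) % W) s 1 hr0 (by rw [h2]; omega)
      refine ⟨?_, ?_, ih3, ih4⟩
      · rw [ih1, List.map_cons]
        have hcq : ¬ (clsOf W ((c.length : Int)) = ((s : Int), (0:Int))) := by
          simp [clsOf, hodd]
        simp [hcq]
      · rw [ih2, hbump, List.map_cons]
        by_cases hrs : (c.length : Int) % W = (s : Int)
        · have hcq : clsOf W ((c.length : Int)) = ((s : Int), (1:Int)) := by
            unfold clsOf; rw [hrs, hodd]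
          rw [if_pos hrs]
          simp [hcq]
          ring
        · have hcq : ¬ (clsOf W ((c.length : Int)) = ((s : Int), (1:Int))) := by
            simp [clsOf, hrs]
          rw [if_neg hrs]
          simp [hcq]

-- ===== pairQ combinatorics =====

lemma qAt_comm (W s : Int) (a b : Int × Int) : qAt W s a b = qAt W s b a := by
  unfold qAt
  rw [mul_comm b.1 a.1]
  by_cases h : a.2 = b.2
  · simp [h]
  · have h' : ¬ (b.2 = a.2) := fun hh => h hh.symm
    simp [h, h']

lemma pairQ_perm (W s : Int) {l l' : List (Int × Int)} (h : l.Perm l') :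
    pairQ W s l = pairQ W s l' := by
  induction h with
  | nil => rfl
  | cons x h ih =>
    simp only [pairQ, ih, (h.map (qAt W s x)).sum_eq]
  | swap x y l =>
    simp only [pairQ, List.map_cons, List.sum_cons]
    rw [qAt_comm W s y x]
    ring
  | trans h1 h2 ih1 ih2 => exact ih1.trans ih2

lemma pairQ_append (W s : Int) : ∀ (xs ys : List (Int × Int)),
    pairQ W s (xs ++ ys) = pairQ W s xs + pairQ W s ys + crossQ W s xs ys := by
  intro xs ys
  induction xs with
  | nil => simp [pairQ, crossQ]
  | cons x xs ih =>
    simp only [List.cons_append, pairQ, List.map_append, List.sum_append, ih, crossQ,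
      List.map_cons, List.sum_cons]
    ring

lemma crossQ_nil_right (W s : Int) (xs : List (Int × Int)) : crossQ W s xs [] = 0 := by
  simp [crossQ]

lemma crossQ_append_right (W s : Int) (xs ys zs : List (Int × Int)) :
    crossQ W s xs (ys ++ zs) = crossQ W s xs ys + crossQ W s xs zs := by
  unfold crossQ
  rw [← PySem.List.sum_map_add_int]
  congr 1
  apply List.map_congr_left
  intro x _
  rw [List.map_append, List.sum_append]

lemma crossQ_flatten (W s : Int) (xs : List (Int × Int)) :
    ∀ (ls : List (List (Int × Int))),
    crossQ W s xs ls.flatten = (ls.map (crossQ W s xs)).sum := by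
  intro ls
  induction ls with
  | nil => simp [crossQ_nil_right]
  | cons b ls ih => simp [List.flatten_cons, crossQ_append_right, ih]

lemma crossQ_replicate (W s : Int) (n m : Nat) (q1 q2 : Int × Int) :
    crossQ W s (List.replicate n q1) (List.replicate m q2)
      = (n : Int) * (m : Int) * qAt W s q1 q2 := by
  unfold crossQ
  simp [List.map_replicate, List.sum_replicate]
  ring

lemma gauss_cast (m : Nat) (hm : 1 ≤ m) :
    ((m : Int) * ((m : Int) - 1)) / 2 = ((m * (m - 1) / 2 : Nat) : Int) := by
  obtain ⟨k, rfl⟩ : ∃ k, m = k + 1 := ⟨m - 1, by omega⟩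
  obtain ⟨e, he⟩ := Nat.even_mul_succ_self k
  have h2 : (k + 1) * (k + 1 - 1) = k * (k + 1) := by
    rw [Nat.add_sub_cancel]; exact Nat.mul_comm _ _
  have h3 : (k + 1) * (k + 1 - 1) / 2 = e := by omega
  rw [h3]
  have hN : k * (k + 1) = 2 * e := by omega
  have hZ : ((k + 1 : Nat) : Int) * (((k + 1 : Nat) : Int) - 1) = 2 * (e : Int) := by
    push_cast
    have hc : ((k : Int)) * ((k : Int) + 1) = 2 * (e : Int) := by exact_mod_cast hN
    linear_combination hc
  rw [hZ, Int.mul_ediv_cancel_left _ (by norm_num : (2 : Int) ≠ 0)]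

lemma pairQ_replicate (W s : Int) (q : Int × Int) :
    ∀ (n : Nat), pairQ W s (List.replicate n q) = ((n * (n - 1) / 2 : Nat) : Int) * qAt W s q q := by
  intro n
  induction n with
  | zero => simp [pairQ]
  | succ n ih =>
    rw [List.replicate_succ]
    simp only [pairQ, List.map_replicate, List.sum_replicate, nsmul_eq_mul, ih]
    have hnat : (n + 1) * (n + 1 - 1) / 2 = n * (n - 1) / 2 + n := by
      rcases n with _ | k
      · simp
      · obtain ⟨e1, he1⟩ := Nat.even_mul_succ_self (k + 1)
        obtain ⟨e2, he2⟩ := Nat.even_mul_succ_self k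
        have h1 : (k + 1 + 1) * (k + 1 + 1 - 1) = (k + 1) * (k + 1 + 1) := by
          rw [Nat.add_sub_cancel]; exact Nat.mul_comm _ _
        have h2 : (k + 1) * (k + 1 - 1) = k * (k + 1) := by
          rw [Nat.add_sub_cancel]; exact Nat.mul_comm _ _
        have h3 : (k + 1) * (k + 1 + 1) = k * (k + 1) + (k + 1) + (k + 1) := by ring
        omega
    rw [hnat]
    push_cast
    ring

-- qAt at equal classes has sign +1
lemma qAt_self (W s : Int) (q : Int × Int) :
    qAt W s q q = if (q.1 * q.1) % W = s then 1 else 0 := by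
  unfold qAt
  simp

lemma diag_eq (W s : Int) (r p : Int) (m : Nat) (hm : 0 < m) :
    (if 2 ≤ ((m : Nat) : Int) ∧ (r * r) % W = s then ((m : Nat) : Int) * (((m : Nat) : Int) - 1) / 2 else 0)
      = ((m * (m - 1) / 2 : Nat) : Int) * qAt W s (r, p) (r, p) := by
  rw [qAt_self]
  by_cases hk : (r * r) % W = s
  · rw [if_pos hk, mul_one]
    by_cases h2 : 2 ≤ ((m : Nat) : Int)
    · rw [if_pos ⟨h2, hk⟩]
      exact gauss_cast m hm
    · rw [if_neg (fun hcon => h2 hcon.1)]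
      have hm1 : m = 1 := by omega
      subst hm1
      simp
  · rw [if_neg hk, mul_zero, if_neg (fun hcon => hk hcon.2)]

lemma catS_eq_pairQ (W s : Int) :
    ∀ (L : List (Int × Int × Int)),
    (∀ t ∈ L, ∃ m : Nat, 0 < m ∧ t.2.2 = (m : Int)) →
    catS W s L = pairQ W s ((L.map blockOf).flatten) := by
  intro L
  induction L with
  | nil => intro _; simp [catS, pairQ]
  | cons t rest ih =>
    intro h
    obtain ⟨m, hm, htm⟩ := h t List.mem_cons_self
    have hrest : ∀ u ∈ rest, ∃ m : Nat, 0 < m ∧ u.2.2 = (m : Int) :=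
      fun u hu => h u (List.mem_cons_of_mem _ hu)
    have hblock : blockOf t = List.replicate m (t.1, t.2.1) := by
      unfold blockOf; rw [htm]; simp
    have hd : (if 2 ≤ t.2.2 ∧ (t.1 * t.1) % W = s then t.2.2 * (t.2.2 - 1) / 2 else 0)
        = pairQ W s (blockOf t) := by
      rw [hblock, pairQ_replicate, htm]
      exact diag_eq W s t.1 t.2.1 m hm
    have hc : ((rest.map (fun u => if (t.1 * u.1) % W = s then (if t.2.1 = u.2.1 then 1 else -1) * (t.2.2 * u.2.2) else 0)).sum)
        = crossQ W s (blockOf t) ((rest.map blockOf).flatten) := by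
      rw [crossQ_flatten, List.map_map]
      congr 1
      apply List.map_congr_left
      intro u hu
      obtain ⟨m2, hm2, hum⟩ := hrest u hu
      have hub : blockOf u = List.replicate m2 (u.1, u.2.1) := by
        unfold blockOf; rw [hum]; simp
      simp only [Function.comp_apply, hub, hblock, crossQ_replicate]
      by_cases hk : (t.1 * u.1) % W = s
      · by_cases hp : t.2.1 = u.2.1 <;> simp [qAt, hk, hp, htm, hum]
      · simp [qAt, hk]
    simp only [catS, List.map_cons, List.flatten_cons]
    rw [pairQ_append, hd, hc, ih hrest]
    ring

-- ===== histogram / canonical permutation =====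

lemma sum_ite_mem (a : Int) (C : Nat) :
    ∀ (l : List Int), l.Nodup →
    (l.map (fun r => if r = a then C else 0)).sum = if a ∈ l then C else 0 := by
  intro l
  induction l with
  | nil => intro _; simp
  | cons r l ih =>
    intro hnd
    obtain ⟨hr, hnd'⟩ := List.nodup_cons.1 hnd
    simp only [List.map_cons, List.sum_cons, ih hnd', List.mem_cons]
    by_cases h : r = a
    · subst h
      simp [hr]
    · have h' : ¬ a = r := fun hh => h hh.symm
      simp [h, h']

lemma count_grouped (cls : List (Int × Int)) (q : Int × Int) (r : Int) :
    List.count q (List.replicate (List.count (r, (0:Int)) cls) (r, (0:Int))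
        ++ List.replicate (List.count (r, (1:Int)) cls) (r, (1:Int)))
      = if r = q.1 then (if q.2 = 0 ∨ q.2 = 1 then List.count q cls else 0) else 0 := by
  obtain ⟨q1, q2⟩ := q
  rw [List.count_append, List.count_replicate, List.count_replicate]
  by_cases hr : r = q1
  · subst hr
    by_cases h0 : q2 = 0
    · subst h0; simp
    · by_cases h1 : q2 = 1
      · subst h1; simp
      · simp [h0, h1, Ne.symm h0, Ne.symm h1]
  · simp [hr]

lemma perm_canonical (W : Int) (cls : List (Int × Int))
    (hcls : ∀ q ∈ cls, (0 ≤ q.1 ∧ q.1 < W) ∧ (q.2 = 0 ∨ q.2 = 1)) :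
    ((PySem.List.pyRange 0 W 1).flatMap (fun r =>
        List.replicate (List.count (r, (0:Int)) cls) (r, (0:Int))
          ++ List.replicate (List.count (r, (1:Int)) cls) (r, (1:Int)))).Perm cls := by
  rw [List.perm_iff_count]
  intro q
  rw [List.flatMap_def, List.count_flatten, List.map_map]
  have hmap : ((PySem.List.pyRange 0 W 1).map
      (List.count q ∘ fun r => List.replicate (List.count (r, (0:Int)) cls) (r, (0:Int))
          ++ List.replicate (List.count (r, (1:Int)) cls) (r, (1:Int))))
      = (PySem.List.pyRange 0 W 1).map (fun r => if r = q.1 then (if q.2 = 0 ∨ q.2 = 1 then List.count q cls else 0) else 0) := by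
    apply List.map_congr_left
    intro r _
    simp only [Function.comp_apply]
    exact count_grouped cls q r
  rw [hmap, sum_ite_mem q.1 (if q.2 = 0 ∨ q.2 = 1 then List.count q cls else 0) _
      (PySem.List.nodup_pyRange_one 0 W)]
  by_cases hq : q.1 ∈ PySem.List.pyRange 0 W 1
  · rw [if_pos hq]
    by_cases hp : q.2 = 0 ∨ q.2 = 1
    · rw [if_pos hp]
    · rw [if_neg hp]
      symm
      rw [List.count_eq_zero]
      intro hmem
      exact hp (hcls q hmem).2
  · rw [if_neg hq]
    symm
    rw [List.count_eq_zero]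
    intro hmem
    have h1 := (hcls q hmem).1
    rw [PySem.List.mem_pyRange_one] at hq
    omega

-- ===== A side: acc loops =====

lemma cfPairStep_length (W : Int) (t1 : Int × Int × Int) (acc : List Int) (t2 : Int × Int × Int) :
    (cfPairStep W t1 acc t2).length = acc.length := by
  simp only [cfPairStep]
  simp

lemma cfOuterStep_length (W : Int) (cats : List (Int × Int × Int)) (n : Int) (acc : List Int) (i : Int) :
    (cfOuterStep W cats n acc i).length = acc.length := by
  simp only [cfOuterStep]
  rw [foldl_len_pres _ (fun acc j => cfPairStep_length W _ acc _)]
  split <;> simp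

lemma cfPairStep_getD (W : Int) (hW : 0 < W) (t1 u : Int × Int × Int) (s : Nat) (acc : List Int)
    (hlen : acc.length = W.toNat) :
    (cfPairStep W t1 acc u).getD s 0
      = acc.getD s 0 + (if (t1.1 * u.1) % W = (s : Int) then (if t1.2.1 = u.2.1 then 1 else -1) * (t1.2.2 * u.2.2) else 0) := by
  have hkey : PySem.Int.mod (t1.1 * u.1) W = (t1.1 * u.1) % W := PySem.Int.mod_eq_emod_of_pos hW
  have hb0 : 0 ≤ (t1.1 * u.1) % W := Int.emod_nonneg _ (by omega)
  have hb1 : (t1.1 * u.1) % W < (acc.length : Int) := by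
    have := Int.emod_lt_of_pos (t1.1 * u.1) hW
    omega
  simp only [cfPairStep]
  rw [hkey, getD_set_bump _ _ _ _ hb0 hb1]

lemma pairfold_getD (W : Int) (hW : 0 < W) (t1 : Int × Int × Int) (s : Nat) :
    ∀ (l : List (Int × Int × Int)) (acc : List Int), acc.length = W.toNat →
    (l.foldl (cfPairStep W t1) acc).getD s 0
      = acc.getD s 0 + (l.map (fun u => if (t1.1 * u.1) % W = (s : Int) then (if t1.2.1 = u.2.1 then 1 else -1) * (t1.2.2 * u.2.2) else 0)).sum := by
  intro l
  induction l with
  | nil => intro acc h; simp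
  | cons u l ih =>
    intro acc hlen
    rw [List.foldl_cons, ih _ (by rw [cfPairStep_length]; exact hlen),
        cfPairStep_getD W hW t1 u s acc hlen]
    simp only [List.map_cons, List.sum_cons]
    ring

lemma cfOuterStep_getD (W : Int) (hW : 0 < W) (cats : List (Int × Int × Int)) (s : Nat)
    (i : Nat) (hi : i < cats.length) (acc : List Int) (hlen : acc.length = W.toNat) :
    (cfOuterStep W cats (PySem.List.len cats) acc (i : Int)).getD s 0
      = acc.getD s 0
        + (if 2 ≤ cats[i].2.2 ∧ (cats[i].1 * cats[i].1) % W = (s : Int) then cats[i].2.2 * (cats[i].2.2 - 1) / 2 else 0)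
        + ((cats.drop (i + 1)).map (fun u => if (cats[i].1 * u.1) % W = (s : Int) then (if cats[i].2.1 = u.2.1 then 1 else -1) * (cats[i].2.2 * u.2.2) else 0)).sum := by
  have ht1 : PySem.List.pyGetD cats ((i : Nat) : Int) (0, 0, 0) = cats[i] := by
    rw [PySem.List.pyGetD_natCast, List.getD_eq_getElem _ _ hi]
  have hkey : PySem.Int.mod (cats[i].1 * cats[i].1) W = (cats[i].1 * cats[i].1) % W :=
    PySem.Int.mod_eq_emod_of_pos hW
  have hb0 : 0 ≤ (cats[i].1 * cats[i].1) % W := Int.emod_nonneg _ (by omega)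
  have hb1 : (cats[i].1 * cats[i].1) % W < (acc.length : Int) := by
    have := Int.emod_lt_of_pos (cats[i].1 * cats[i].1) hW
    omega
  have hfd : PySem.Int.floordiv (cats[i].2.2 * (cats[i].2.2 - 1)) 2
      = cats[i].2.2 * (cats[i].2.2 - 1) / 2 := PySem.Int.floordiv_eq_ediv_of_pos (by norm_num)
  have hrange : ((i : Int) + 1) = ((i + 1 : Nat) : Int) := by push_cast; ring
  simp only [cfOuterStep, ht1]
  rw [hrange, PySem.List.foldl_pyRange_pyGetD cats (0, 0, 0) (cfPairStep W cats[i]) _ (by omega),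
      Int.toNat_natCast]
  by_cases h2 : 2 ≤ cats[i].2.2
  · rw [if_pos h2, pairfold_getD W hW _ s _ _ (by simp [hlen]), hkey, hfd,
        getD_set_bump _ _ _ _ hb0 hb1]
    by_cases hk : (cats[i].1 * cats[i].1) % W = (s : Int)
    · rw [if_pos hk, if_pos ⟨h2, hk⟩]
    · rw [if_neg hk, if_neg (fun hcon => hk hcon.2)]
  · rw [if_neg h2, pairfold_getD W hW _ s _ _ hlen, if_neg (fun hcon => h2 hcon.1)]
    ring

lemma outer_fold_getD (W : Int) (hW : 0 < W) (cats : List (Int × Int × Int)) (s : Nat) :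
    ∀ (d i : Nat), cats.length = i + d → ∀ (acc : List Int), acc.length = W.toNat →
    ((PySem.List.pyRange (i : Int) (PySem.List.len cats) 1).foldl
        (cfOuterStep W cats (PySem.List.len cats)) acc).getD s 0
      = acc.getD s 0 + catS W (s : Int) (cats.drop i) := by
  intro d
  induction d with
  | zero =>
    intro i hlen acc hacc
    have h1 : PySem.List.pyRange (i : Int) (PySem.List.len cats) 1 = [] := by
      apply PySem.List.pyRange_one_eq_nil
      simp [hlen]
    rw [h1, List.foldl_nil, List.drop_of_length_le (by omega)]
    simp [catS]
  | succ d ih =>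
    intro i hlen acc hacc
    have hi : i < cats.length := by omega
    have h1 : PySem.List.pyRange (i : Int) (PySem.List.len cats) 1
        = (i : Int) :: PySem.List.pyRange ((i : Int) + 1) (PySem.List.len cats) 1 := by
      apply PySem.List.pyRange_one_cons
      simp
      omega
    rw [h1, List.foldl_cons]
    have hrange : ((i : Int) + 1) = ((i + 1 : Nat) : Int) := by push_cast; ring
    rw [hrange, ih (i + 1) (by omega) _ (by rw [cfOuterStep_length]; exact hacc)]
    rw [cfOuterStep_getD W hW cats s i hi acc hacc]
    rw [List.drop_eq_getElem_cons hi]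
    simp only [catS]
    ring


-- ===== main assembly =====

lemma cats_char (W : Int) (ce co : List Int) (cls : List (Int × Int))
    (hce : ∀ t : Nat, ce.getD t 0 = (List.count ((t : Int), (0:Int)) cls : Int))
    (hco : ∀ t : Nat, co.getD t 0 = (List.count ((t : Int), (1:Int)) cls : Int)) :
    (PySem.List.pyRange 0 W 1).foldl (cfCatStep ce co) []
      = (PySem.List.pyRange 0 W 1).flatMap (fun r =>
          (if List.count (r, (0:Int)) cls ≠ 0 then [(r, (0 : Int), (List.count (r, (0:Int)) cls : Int))] else [])
          ++ (if List.count (r, (1:Int)) cls ≠ 0 then [(r, (1 : Int), (List.count (r, (1:Int)) cls : Int))] else [])) := by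
  rw [PySem.List.foldl_congr_mem
      (g := fun cs r => cs ++
          ((if List.count (r, (0:Int)) cls ≠ 0 then [(r, (0 : Int), (List.count (r, (0:Int)) cls : Int))] else [])
            ++ (if List.count (r, (1:Int)) cls ≠ 0 then [(r, (1 : Int), (List.count (r, (1:Int)) cls : Int))] else [])))]
  · rw [PySem.List.foldl_append_eq_flatMap]
    simp
  · intro cs r hr
    obtain ⟨hr0, hrW⟩ := (PySem.List.mem_pyRange_one).1 hr
    have hrt : ((r.toNat : Nat) : Int) = r := by omega
    have hc0 : PySem.List.pyGetD ce r 0 = (List.count (r, (0:Int)) cls : Int) := by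
      rw [← hrt, PySem.List.pyGetD_natCast, hce r.toNat, hrt]
    have hc1 : PySem.List.pyGetD co r 0 = (List.count (r, (1:Int)) cls : Int) := by
      rw [← hrt, PySem.List.pyGetD_natCast, hco r.toNat, hrt]
    simp only [cfCatStep, hc0, hc1]
    by_cases h0 : List.count (r, (0:Int)) cls = 0 <;>
      by_cases h1 : List.count (r, (1:Int)) cls = 0 <;>
        simp [h0, h1]

lemma flatten_blocks (W : Int) (cls : List (Int × Int)) :
    (((PySem.List.pyRange 0 W 1).flatMap (fun r =>
          (if List.count (r, (0:Int)) cls ≠ 0 then [(r, (0 : Int), (List.count (r, (0:Int)) cls : Int))] else [])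
          ++ (if List.count (r, (1:Int)) cls ≠ 0 then [(r, (1 : Int), (List.count (r, (1:Int)) cls : Int))] else []))).map blockOf).flatten
      = (PySem.List.pyRange 0 W 1).flatMap (fun r =>
          List.replicate (List.count (r, (0:Int)) cls) (r, (0:Int))
            ++ List.replicate (List.count (r, (1:Int)) cls) (r, (1:Int))) := by
  rw [← List.flatMap_def, List.flatMap_assoc]
  have hper : ∀ r : Int,
      (((if List.count (r, (0:Int)) cls ≠ 0 then [(r, (0 : Int), (List.count (r, (0:Int)) cls : Int))] else [])
        ++ (if List.count (r, (1:Int)) cls ≠ 0 then [(r, (1 : Int), (List.count (r, (1:Int)) cls : Int))] else []))).flatMap blockOf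
      = List.replicate (List.count (r, (0:Int)) cls) (r, (0:Int))
          ++ List.replicate (List.count (r, (1:Int)) cls) (r, (1:Int)) := by
    intro r
    by_cases h0 : List.count (r, (0:Int)) cls = 0 <;>
      by_cases h1 : List.count (r, (1:Int)) cls = 0 <;>
        simp [h0, h1, blockOf]
  simp only [hper]

lemma main_eq (Xlist : List (List Int)) (fn : Int) (L : List Int) (hL : L ≠ []) :
    construction_fast Xlist fn L = construction_fast_alt Xlist fn L := by
  have hWpos : 0 < PySem.List.len L := by
    cases L with
    | nil => exact absurd rfl hL
    | cons a l => simp [PySem.List.len]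
  set W := PySem.List.len L with hWdef
  set cls := Xlist.map (fun c => clsOf W ((c.length : Int))) with hcls
  set counts := Xlist.foldl (cfCountStep W) (List.replicate W.toNat 0, List.replicate W.toNat 0) with hcounts
  set cats := (PySem.List.pyRange 0 W 1).foldl (cfCatStep counts.1 counts.2) ([] : List (Int × Int × Int)) with hcatsdef
  set accA := (PySem.List.pyRange 0 (PySem.List.len cats) 1).foldl
      (cfOuterStep W cats (PySem.List.len cats)) (List.replicate W.toNat 0) with haccA
  set lens := Xlist.map (fun c => PySem.List.len c) with hlens
  set accB := cfAltLoop W (List.replicate W.toNat 0) lens with haccB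
  have hgoalA : construction_fast Xlist fn L = accA.map (fun v => if 0 < v then 255 else 0) := rfl
  have hgoalB : construction_fast_alt Xlist fn L = accB.map (fun v => if 0 < v then 255 else 0) := rfl
  rw [hgoalA, hgoalB]
  suffices h : accA = accB by rw [h]
  have hce : ∀ t : Nat, counts.1.getD t 0 = (List.count ((t : Int), (0:Int)) cls : Int) := by
    intro t
    obtain ⟨h1, _, _, _⟩ := counts_fold W hWpos t Xlist
      (List.replicate W.toNat 0) (List.replicate W.toNat 0) (by simp) (by simp)
    rw [← hcounts] at h1
    rw [h1, getD_replicate_zero, hcls]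
    ring
  have hco : ∀ t : Nat, counts.2.getD t 0 = (List.count ((t : Int), (1:Int)) cls : Int) := by
    intro t
    obtain ⟨_, h2, _, _⟩ := counts_fold W hWpos t Xlist
      (List.replicate W.toNat 0) (List.replicate W.toNat 0) (by simp) (by simp)
    rw [← hcounts] at h2
    rw [h2, getD_replicate_zero, hcls]
    ring
  have hcatschar := cats_char W counts.1 counts.2 cls hce hco
  rw [← hcatsdef] at hcatschar
  have hclsprops : ∀ q ∈ cls, (0 ≤ q.1 ∧ q.1 < W) ∧ (q.2 = 0 ∨ q.2 = 1) := by
    intro q hq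
    rw [hcls, List.mem_map] at hq
    obtain ⟨c, _, hc⟩ := hq
    subst hc
    refine ⟨⟨Int.emod_nonneg _ (by omega), Int.emod_lt_of_pos _ hWpos⟩, ?_⟩
    exact Int.emod_two_eq _
  have hperm := perm_canonical W cls hclsprops
  have hcatmem : ∀ t ∈ cats, ∃ m : Nat, 0 < m ∧ t.2.2 = (m : Int) := by
    intro t ht
    rw [hcatschar, List.mem_flatMap] at ht
    obtain ⟨r, _, hmem⟩ := ht
    rw [List.mem_append] at hmem
    rcases hmem with hm | hm <;>
    · split at hm
      · rename_i hcnt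
        rw [List.mem_singleton] at hm
        subst hm
        exact ⟨_, by omega, rfl⟩
      · simp at hm
  have hlenA : accA.length = W.toNat := by
    rw [haccA, foldl_len_pres _ (fun acc i => cfOuterStep_length W cats _ acc i)]
    simp
  have hlenB : accB.length = W.toNat := by
    rw [haccB, cfAltLoop_length]
    simp
  apply List.ext_getElem (by rw [hlenA, hlenB])
  intro i h1 h2
  have hsA : accA.getD i 0 = catS W (i : Int) cats := by
    have := outer_fold_getD W hWpos cats i cats.length 0 (by omega)
      (List.replicate W.toNat 0) (by simp)
    push_cast at this
    rw [← haccA] at this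
    simpa [getD_replicate_zero] using this
  have hsB : accB.getD i 0 = pairQ W (i : Int) cls := by
    have := cfAltLoop_getD W hWpos i lens (List.replicate W.toNat 0) (by simp)
    rw [← haccB] at this
    rw [this, getD_replicate_zero]
    have hmm : lens.map (clsOf W) = cls := by
      rw [hlens, hcls, List.map_map]
      simp [Function.comp_def]
    rw [hmm]
    ring
  have hA2 : catS W (i : Int) cats = pairQ W (i : Int) cls := by
    rw [catS_eq_pairQ W (i : Int) cats hcatmem, hcatschar, flatten_blocks]
    exact pairQ_perm W (i : Int) hperm
  rw [← List.getD_eq_getElem accA 0 h1, ← List.getD_eq_getElem accB 0 h2, hsA, hsB, hA2]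

-- ===== VERDICT (by name: the statement is the Claim_ definition above) =====
theorem construction_fast_spec : Claim_equal_construction_fast := by
  intro Xlist fn L _ hpre
  show construction_fast Xlist fn L = construction_fast_alt Xlist fn L
  by_cases hL : L = []
  · subst hL
    rcases hpre with h | h
    · exact absurd rfl h
    · subst h
      rfl
  · exact main_eq Xlist fn L hL
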